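-- pv_equiv track=rewrite | github.com/bilgedemirkaya/VisProbe | scripts/update_docs.py | map_code_to_docs
-- ===== SOURCE A (Python) =====
-- from typing import Dict, List, Set, Tuple
--
-- DOC_MAPPING = {
--     'src/visprobe/api/decorators.py': [
--         'docs/api/index.md',
--         'docs/user-guide.md',
--         'docs/examples/index.md',
--     ],
--     'src/visprobe/api/runner.py': [
--         'docs/architecture.md',
--         'docs/design-rationale.md',
--     ],
--     'src/visprobe/api/search_modes.py': [
--         'docs/user-guide.md',
--         'docs/architecture.md',
--         'docs/design-rationale.md',
--     ],
--     'src/visprobe/strategies/base.py': [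
--         'docs/api/index.md',
--         'docs/architecture.md',
--     ],
--     'src/visprobe/strategies/image.py': [
--         'docs/api/index.md',
--         'docs/user-guide.md',
--         'docs/examples/index.md',
--     ],
--     'src/visprobe/strategies/adversarial.py': [
--         'docs/api/index.md',
--         'docs/user-guide.md',
--         'docs/examples/index.md',
--     ],
--     'src/visprobe/properties/base.py': [
--         'docs/api/index.md',
--     ],
--     'src/visprobe/properties/classification.py': [
--         'docs/api/index.md',
--         'docs/user-guide.md',
--         'docs/examples/index.md',
--     ],
--     'src/visprobe/properties/helpers.py': [
--         'docs/api/index.md',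
--     ],
--     'src/visprobe/api/config.py': [
--         'docs/api/index.md',
--     ],
--     'src/visprobe/api/utils.py': [
--         'docs/api/index.md',
--     ],
-- }
--
-- def map_code_to_docs(changed_files: List[str]) -> Dict[str, Set[str]]:
--     """Map changed code files to documentation files that need updating."""
--     doc_updates = {}
--
--     for code_file in changed_files:
--         # Check if we have a direct mapping
--         if code_file in DOC_MAPPING:
--             if code_file not in doc_updates:
--                 doc_updates[code_file] = set()
--             doc_updates[code_file].update(DOC_MAPPING[code_file])
--         else:
--             # Check for pattern matches (e.g., any file in strategies/)
--             for pattern, docs in DOC_MAPPING.items():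
--                 if pattern.endswith('*.py'):
--                     pattern_dir = pattern.rsplit('/', 1)[0]
--                     if code_file.startswith(pattern_dir):
--                         if code_file not in doc_updates:
--                             doc_updates[code_file] = set()
--                         doc_updates[code_file].update(docs)
--
--     return doc_updates
-- ===== SOURCE B (Python) =====
-- PREFIX = 'src/visprobe/'
-- API = 'docs/api/index.md'
-- UG = 'docs/user-guide.md'
-- EX = 'docs/examples/index.md'
-- ARCH = 'docs/architecture.md'
-- DR = 'docs/design-rationale.md'
--
-- # the same mapping, factored: module path relative to PREFIX -> doc files
-- DOCS_FOR = [
--     ('api/decorators.py', [API, UG, EX]),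
--     ('api/runner.py', [ARCH, DR]),
--     ('api/search_modes.py', [UG, ARCH, DR]),
--     ('strategies/base.py', [API, ARCH]),
--     ('strategies/image.py', [API, UG, EX]),
--     ('strategies/adversarial.py', [API, UG, EX]),
--     ('properties/base.py', [API]),
--     ('properties/classification.py', [API, UG, EX]),
--     ('properties/helpers.py', [API]),
--     ('api/config.py', [API]),
--     ('api/utils.py', [API]),
-- ]
--
--
-- def map_code_to_docs(changed_files):
--     """Map changed code files to documentation files that need updating."""
--     # build the result as an ordered list of (file, docs) pairs: for each
--     # changed file not handled yet, scan the table for its entry (first match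
--     # wins); the dead '*.py' pattern branch of the original never fires and
--     # is dropped
--     mapped = []
--     for f in changed_files:
--         if any(k == f for k, _ in mapped):
--             continue
--         for rel, docs in DOCS_FOR:
--             if f == PREFIX + rel:
--                 mapped.append((f, set(docs)))
--                 break
--     return dict(mapped)
-- ===== Notes on version B (the rewrite author's own statement) =====
-- stated objective: alternative
-- what changed: Replaces A's dict-of-sets built with membership tests, set-default insertion, incremental set.update and a dead '*.py' pattern scan by an ordered list of pairs built per file via a first-match linear scan of a prefix-factored (relative-path, docs) table, converted to a dict at the end.
import Mathlib
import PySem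

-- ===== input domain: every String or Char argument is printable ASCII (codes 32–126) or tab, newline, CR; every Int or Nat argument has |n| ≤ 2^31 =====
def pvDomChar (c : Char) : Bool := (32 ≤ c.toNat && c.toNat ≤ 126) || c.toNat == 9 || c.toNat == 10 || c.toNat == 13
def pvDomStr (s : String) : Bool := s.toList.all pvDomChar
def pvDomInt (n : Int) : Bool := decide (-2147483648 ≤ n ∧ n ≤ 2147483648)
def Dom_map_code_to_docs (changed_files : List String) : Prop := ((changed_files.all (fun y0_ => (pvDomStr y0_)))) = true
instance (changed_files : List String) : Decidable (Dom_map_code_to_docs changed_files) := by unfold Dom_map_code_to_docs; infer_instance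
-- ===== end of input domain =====

-- B builds an ordered (file, docs) pair list by a first-match scan of a prefix-factored table
-- instead of A's dict-of-sets with incremental updates and a dead '*.py' pattern scan; same values.

-- ===== PORT A =====
-- module constant DOC_MAPPING
def docMapping : PySem.Dict String (List String) := PySem.Dict.mk [
  ("src/visprobe/api/decorators.py", ["docs/api/index.md", "docs/user-guide.md", "docs/examples/index.md"]),
  ("src/visprobe/api/runner.py", ["docs/architecture.md", "docs/design-rationale.md"]),
  ("src/visprobe/api/search_modes.py", ["docs/user-guide.md", "docs/architecture.md", "docs/design-rationale.md"]),
  ("src/visprobe/strategies/base.py", ["docs/api/index.md", "docs/architecture.md"]),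
  ("src/visprobe/strategies/image.py", ["docs/api/index.md", "docs/user-guide.md", "docs/examples/index.md"]),
  ("src/visprobe/strategies/adversarial.py", ["docs/api/index.md", "docs/user-guide.md", "docs/examples/index.md"]),
  ("src/visprobe/properties/base.py", ["docs/api/index.md"]),
  ("src/visprobe/properties/classification.py", ["docs/api/index.md", "docs/user-guide.md", "docs/examples/index.md"]),
  ("src/visprobe/properties/helpers.py", ["docs/api/index.md"]),
  ("src/visprobe/api/config.py", ["docs/api/index.md"]),
  ("src/visprobe/api/utils.py", ["docs/api/index.md"])]

-- pattern.rsplit('/', 1)[0]: exact hand port (PySem has no rsplit) — the text before the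
-- LAST '/', or the whole string when '/' is absent
def rsplitHead (s : String) : String :=
  let i := PySem.Chars.rfind s.toList ['/']
  if i = -1 then s else String.ofList (PySem.Chars.slice s.toList none (some i))

-- body of A's outer 'for code_file in changed_files' loop
def aStep (d : PySem.Dict String (PySem.Set String)) (code_file : String) :
    PySem.Dict String (PySem.Set String) :=
  if docMapping.contains code_file then
    let d := if d.contains code_file then d else d.insert code_file PySem.Set.empty
    d.insert code_file
      (PySem.Set.update (d.getD code_file PySem.Set.empty) (docMapping.getD code_file []))
  else
    docMapping.items.foldl (fun d2 pd =>
      if PySem.Str.endswith pd.1 "*.py" then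
        let pattern_dir := rsplitHead pd.1
        if PySem.Str.startswith code_file pattern_dir then
          let d2 := if d2.contains code_file then d2 else d2.insert code_file PySem.Set.empty
          d2.insert code_file (PySem.Set.update (d2.getD code_file PySem.Set.empty) pd.2)
        else d2
      else d2) d

def map_code_to_docs (changed_files : List String) : List (String × List String) :=
  (changed_files.foldl aStep PySem.Dict.empty).items

-- ===== PORT B =====
def pvPrefix : String := "src/visprobe/"
def dApi : String := "docs/api/index.md"
def dUg : String := "docs/user-guide.md"
def dEx : String := "docs/examples/index.md"
def dArch : String := "docs/architecture.md"
def dDr : String := "docs/design-rationale.md"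

-- B's table DOCS_FOR: module path relative to pvPrefix → doc files
def docsFor : List (String × List String) := [
  ("api/decorators.py", [dApi, dUg, dEx]),
  ("api/runner.py", [dArch, dDr]),
  ("api/search_modes.py", [dUg, dArch, dDr]),
  ("strategies/base.py", [dApi, dArch]),
  ("strategies/image.py", [dApi, dUg, dEx]),
  ("strategies/adversarial.py", [dApi, dUg, dEx]),
  ("properties/base.py", [dApi]),
  ("properties/classification.py", [dApi, dUg, dEx]),
  ("properties/helpers.py", [dApi]),
  ("api/config.py", [dApi]),
  ("api/utils.py", [dApi])]

-- B's loop: per file, skip if already handled, else first-match scan of the table (the 'break')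
def bLoop (mapped : List (String × List String)) : List String → List (String × List String)
  | [] => mapped
  | f :: rest =>
    if (mapped.map Prod.fst).contains f then bLoop mapped rest
    else
      match docsFor.find? (fun p => f == pvPrefix ++ p.1) with
      | some p => bLoop (mapped ++ [(f, PySem.Set.ofList p.2)]) rest
      | none => bLoop mapped rest

def map_code_to_docs_alt (changed_files : List String) : List (String × List String) :=
  bLoop [] changed_files

-- ===== PRECONDITION & SPEC =====
def Spec_map_code_to_docs (changed_files : List String) (out : List (String × List String)) : Prop := out = map_code_to_docs_alt changed_files
instance (changed_files : List String) (out : List (String × List String)) : Decidable (Spec_map_code_to_docs changed_files out) := by unfold Spec_map_code_to_docs; infer_instance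

-- ===== CLAIM (what is proved, stated in full; the proofs are below) =====
def Claim_equal_map_code_to_docs : Prop := ∀ (changed_files : List String), Dom_map_code_to_docs changed_files → Spec_map_code_to_docs changed_files (map_code_to_docs changed_files)

-- ===== LEMMAS AND PROOFS =====

-- the canonical intermediate form both loops reach: ordered dedup of the files seen so far,
-- keeping the mapped ones with their doc set
def bEntry (f : String) : Option (String × List String) :=
  (docMapping.get? f).map fun docs => (f, PySem.Set.ofList docs)

def bList (xs : List String) : List (String × List String) :=
  (PySem.List.dedup xs).filterMap bEntry

-- docMapping is exactly docsFor with the prefix glued back on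
lemma docMapping_eq_map :
    docMapping = PySem.Dict.mk (docsFor.map (fun p => (pvPrefix ++ p.1, p.2))) := by decide

lemma get?_mk_prefix_map (l : List (String × List String)) (f : String) :
    (PySem.Dict.mk (l.map (fun p => (pvPrefix ++ p.1, p.2)))).get? f =
      (l.find? (fun p => f == pvPrefix ++ p.1)).map Prod.snd := by
  induction l with
  | nil => simp [PySem.Dict.get?]
  | cons x xs ih =>
    rw [List.map_cons, PySem.Dict.get?_mk_cons, List.find?_cons]
    by_cases h : f = pvPrefix ++ x.1
    · subst h; simp
    · rw [if_neg (by simp [Ne.symm h])]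
      have hb : (f == pvPrefix ++ x.1) = false := by simp [h]
      rw [hb, ih]

-- B's table scan agrees with A's dict lookup
lemma find_eq_bEntry (f : String) :
    (docsFor.find? (fun p => f == pvPrefix ++ p.1)).map
        (fun p => (f, PySem.Set.ofList p.2)) = bEntry f := by
  unfold bEntry
  rw [docMapping_eq_map, get?_mk_prefix_map]
  cases docsFor.find? (fun p => f == pvPrefix ++ p.1) <;> rfl

-- no DOC_MAPPING key ends with '*.py', so A's pattern scan never changes the dict
lemma dead_scan (d : PySem.Dict String (PySem.Set String)) (code_file : String) :
    docMapping.items.foldl (fun d2 pd =>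
      if PySem.Str.endswith pd.1 "*.py" then
        let pattern_dir := rsplitHead pd.1
        if PySem.Str.startswith code_file pattern_dir then
          let d2 := if d2.contains code_file then d2 else d2.insert code_file PySem.Set.empty
          d2.insert code_file (PySem.Set.update (d2.getD code_file PySem.Set.empty) pd.2)
        else d2
      else d2) d = d := by
  rfl

lemma get?_mk_filterMap (l : List String) (f : String) :
    (PySem.Dict.mk (l.filterMap bEntry)).get? f =
      if f ∈ l then (docMapping.get? f).map PySem.Set.ofList else none := by
  induction l with
  | nil => simp [PySem.Dict.get?]
  | cons x xs ih =>
    rw [List.filterMap_cons]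
    cases hx : bEntry x with
    | none =>
      have hgx : docMapping.get? x = none := by
        unfold bEntry at hx
        cases h : docMapping.get? x with
        | none => rfl
        | some docs => rw [h] at hx; simp at hx
      rw [ih]
      by_cases hfx : f = x
      · subst hfx; simp [hgx]
      · simp [List.mem_cons, hfx]
    | some p =>
      obtain ⟨docs, hgx, rfl⟩ :
          ∃ docs, docMapping.get? x = some docs ∧ p = (x, PySem.Set.ofList docs) := by
        unfold bEntry at hx
        cases h : docMapping.get? x with
        | none => rw [h] at hx; simp at hx
        | some docs => rw [h] at hx; exact ⟨docs, rfl, (Option.some_inj.mp hx).symm⟩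
      rw [PySem.Dict.get?_mk_cons]
      by_cases hfx : f = x
      · subst hfx; simp [hgx]
      · have hne : (x == f) = false := by simp [Ne.symm hfx]
        rw [hne]
        simp only [Bool.false_eq_true, if_false, ih]
        simp [List.mem_cons, hfx]

lemma keys_filterMap (l : List String) :
    (l.filterMap bEntry).map Prod.fst = l.filter (fun x => (docMapping.get? x).isSome) := by
  induction l with
  | nil => simp
  | cons x xs ih =>
    rw [List.filterMap_cons]
    cases hx : bEntry x with
    | none =>
      have hgx : docMapping.get? x = none := by
        unfold bEntry at hx
        cases h : docMapping.get? x with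
        | none => rfl
        | some docs => rw [h] at hx; simp at hx
      rw [ih, List.filter_cons]
      simp [hgx]
    | some p =>
      obtain ⟨docs, hgx, rfl⟩ :
          ∃ docs, docMapping.get? x = some docs ∧ p = (x, PySem.Set.ofList docs) := by
        unfold bEntry at hx
        cases h : docMapping.get? x with
        | none => rw [h] at hx; simp at hx
        | some docs => rw [h] at hx; exact ⟨docs, rfl, (Option.some_inj.mp hx).symm⟩
      rw [List.map_cons, ih, List.filter_cons]
      simp [hgx]

lemma nodup_keys_bList (xs : List String) : (PySem.Dict.mk (bList xs)).keys.Nodup := by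
  show ((bList xs).map Prod.fst).Nodup
  rw [bList, keys_filterMap]
  exact (PySem.List.nodup_dedup xs).filter _

lemma insert_self_of_get? (d : PySem.Dict String (PySem.Set String)) (k : String)
    (v : PySem.Set String) (hn : d.keys.Nodup) (h : d.get? k = some v) :
    d.insert k v = d := by
  have hc : d.contains k = true := by rw [PySem.Dict.contains_eq_isSome_get?, h]; rfl
  apply PySem.Dict.ext
  rw [PySem.Dict.items_insert_of_contains _ _ hc]
  have hid : ∀ p ∈ d.items, (if (p.1 == k) = true then (k, v) else p) = id p := by
    intro p hp
    obtain ⟨p1, p2⟩ := p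
    by_cases hpk : p1 = k
    · subst hpk
      have hm := PySem.Dict.get?_of_mem_items d hp hn
      rw [h] at hm
      simp [Option.some_inj.mp hm]
    · simp [hpk]
  rw [List.map_congr_left hid, List.map_id]

lemma update_self_of_subset (s : PySem.Set String) (docs : List String)
    (h : ∀ x ∈ docs, x ∈ s) : PySem.Set.update s docs = s := by
  rw [PySem.Set.update_eq_append_filter]
  have : (PySem.Set.ofList docs).filter (fun y => !(PySem.Set.contains s y)) = [] := by
    apply List.filter_eq_nil_iff.mpr
    intro y hy
    have hys : y ∈ s := h y ((PySem.Set.mem_ofList docs y).mp hy)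
    simp [hys]
  rw [this, List.append_nil]

lemma bList_append_singleton (xs : List String) (f : String) :
    bList (xs ++ [f]) = if f ∈ xs then bList xs else bList xs ++ (bEntry f).toList := by
  unfold bList
  rw [PySem.List.dedup_eq_ofList, PySem.Set.ofList_append_singleton, PySem.Set.add_eq_ite]
  by_cases hf : f ∈ xs
  · simp [PySem.Set.mem_ofList, hf, PySem.List.dedup_eq_ofList]
  · simp only [PySem.Set.mem_ofList, hf, if_false, List.filterMap_append,
      PySem.List.dedup_eq_ofList]
    cases h : bEntry f <;> simp [h]

-- A's loop body advances the canonical form by one file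
lemma step_eq (seen : List String) (f : String) :
    aStep (PySem.Dict.mk (bList seen)) f = PySem.Dict.mk (bList (seen ++ [f])) := by
  have hget := get?_mk_filterMap (PySem.List.dedup seen) f
  rw [show (PySem.List.dedup seen).filterMap bEntry = bList seen from rfl] at hget
  simp only [PySem.List.mem_dedup] at hget
  unfold aStep
  by_cases hm : docMapping.contains f = true
  · obtain ⟨docs, hd⟩ : ∃ docs, docMapping.get? f = some docs := by
      rw [PySem.Dict.contains_eq_isSome_get?] at hm
      cases hg : docMapping.get? f with
      | none => rw [hg] at hm; simp at hm
      | some docs => exact ⟨docs, rfl⟩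
    by_cases hfs : f ∈ seen
    · have hg : (PySem.Dict.mk (bList seen)).get? f = some (PySem.Set.ofList docs) := by
        rw [hget]; simp [hfs, hd]
      have hc : (PySem.Dict.mk (bList seen)).contains f = true := by
        rw [PySem.Dict.contains_eq_isSome_get?, hg]; rfl
      simp only [hm, if_true, hc]
      have hgd : (PySem.Dict.mk (bList seen)).getD f PySem.Set.empty = PySem.Set.ofList docs := by
        rw [PySem.Dict.getD_eq_get?_getD, hg]; rfl
      have hgdm : docMapping.getD f [] = docs := by
        rw [PySem.Dict.getD_eq_get?_getD, hd]; rfl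
      rw [hgd, hgdm, update_self_of_subset _ _ (fun x hx => (PySem.Set.mem_ofList docs x).mpr hx),
        insert_self_of_get? _ _ _ (nodup_keys_bList seen) hg]
      rw [bList_append_singleton, if_pos hfs]
    · have hg : (PySem.Dict.mk (bList seen)).get? f = none := by
        rw [hget]; simp [hfs]
      have hc : (PySem.Dict.mk (bList seen)).contains f = false := by
        rw [PySem.Dict.contains_eq_isSome_get?, hg]; rfl
      simp only [hm, if_true, hc, Bool.false_eq_true, if_false]
      rw [PySem.Dict.getD_insert_self]
      have hgdm : docMapping.getD f [] = docs := by
        rw [PySem.Dict.getD_eq_get?_getD, hd]; rfl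
      rw [hgdm, show PySem.Set.update PySem.Set.empty docs = PySem.Set.ofList docs from rfl,
        PySem.Dict.insert_insert_self]
      apply PySem.Dict.ext
      rw [PySem.Dict.items_insert_of_not_contains _ _ hc]
      rw [show (PySem.Dict.mk (bList seen)).items = bList seen from rfl]
      rw [show (PySem.Dict.mk (bList (seen ++ [f]))).items = bList (seen ++ [f]) from rfl]
      rw [bList_append_singleton, if_neg hfs]
      simp [bEntry, hd]
  · simp only [hm, Bool.false_eq_true, if_false]
    rw [dead_scan]
    congr 1
    rw [bList_append_singleton]
    have hbe : bEntry f = none := by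
      rw [PySem.Dict.contains_eq_isSome_get?] at hm
      unfold bEntry
      cases hg : docMapping.get? f with
      | none => rfl
      | some docs => rw [hg] at hm; simp at hm
    split_ifs <;> simp [hbe]

lemma a_loop (fs : List String) : ∀ seen : List String,
    fs.foldl aStep (PySem.Dict.mk (bList seen)) = PySem.Dict.mk (bList (seen ++ fs)) := by
  induction fs with
  | nil => intro seen; simp
  | cons f rest ih =>
    intro seen
    have h1 := step_eq seen f
    calc (f :: rest).foldl aStep (PySem.Dict.mk (bList seen))
        = rest.foldl aStep (PySem.Dict.mk (bList (seen ++ [f]))) := by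
          simp [List.foldl, h1]
      _ = PySem.Dict.mk (bList ((seen ++ [f]) ++ rest)) := ih (seen ++ [f])
      _ = PySem.Dict.mk (bList (seen ++ f :: rest)) := by simp

-- B's loop also tracks the canonical form
lemma b_loop (fs : List String) : ∀ seen : List String,
    bLoop (bList seen) fs = bList (seen ++ fs) := by
  induction fs with
  | nil => intro seen; rw [List.append_nil]; rfl
  | cons f rest ih =>
    intro seen
    have hkeys : (bList seen).map Prod.fst =
        (PySem.List.dedup seen).filter (fun x => (docMapping.get? x).isSome) :=
      keys_filterMap (PySem.List.dedup seen)
    have hmem : f ∈ (bList seen).map Prod.fst ↔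
        (f ∈ seen ∧ (docMapping.get? f).isSome = true) := by
      rw [hkeys, List.mem_filter, PySem.List.mem_dedup]
    have hstep : bLoop (bList seen) (f :: rest) = bLoop (bList (seen ++ [f])) rest := by
      rw [bLoop]
      by_cases hc : f ∈ (bList seen).map Prod.fst
      · rw [if_pos (by simpa using hc)]
        obtain ⟨hfs, _⟩ := hmem.mp hc
        rw [bList_append_singleton, if_pos hfs]
      · rw [if_neg (by simpa using hc)]
        have hnot := hmem.not.mp hc
        cases hfind : docsFor.find? (fun p => f == pvPrefix ++ p.1) with
        | none =>
          have hbe : bEntry f = none := by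
            rw [← find_eq_bEntry, hfind]; rfl
          rw [bList_append_singleton]
          split_ifs
          · rfl
          · simp [hbe]
        | some p =>
          have hbe : bEntry f = some (f, PySem.Set.ofList p.2) := by
            rw [← find_eq_bEntry, hfind]; rfl
          have hfs : f ∉ seen := by
            intro hin
            exact hnot ⟨hin, by unfold bEntry at hbe; cases h : docMapping.get? f with
              | none => rw [h] at hbe; simp at hbe
              | some _ => rfl⟩
          rw [bList_append_singleton, if_neg hfs, hbe]
          rfl
    rw [hstep, ih (seen ++ [f])]
    simp

-- ===== VERDICT (by name: the statement is the Claim_ definition above) =====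
theorem map_code_to_docs_spec : Claim_equal_map_code_to_docs := by
  intro changed_files _
  show map_code_to_docs changed_files = map_code_to_docs_alt changed_files
  have hA := a_loop changed_files []
  have hB := b_loop changed_files []
  simp only [List.nil_append] at hA hB
  unfold map_code_to_docs map_code_to_docs_alt
  rw [show (PySem.Dict.empty : PySem.Dict String (PySem.Set String)) = PySem.Dict.mk (bList []) from rfl,
    hA, show ([] : List (String × List String)) = bList [] from rfl, hB]
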